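-- pv_equiv track=rewrite | github.com/docToolchain/aoc-2020 | day16/python/t-pi/solution.py | check_col_for_rules
-- ===== SOURCE A (Python) =====
-- def check_col_for_rules(rules, col_numbers):
--     ''' Checks single column from nearby tickets against all rules
--         Returns all valid rule field_names as list
--     '''
--     valid_rules = list()
--     for field in rules.keys():
--         full_range = set()
--         full_range.update(*[range(min_range, max_range+1)
--                             for min_range, max_range in rules[field]])
--         if (all(number in full_range for number in col_numbers)):
--             valid_rules.append(field)
--     return valid_rules
-- ===== SOURCE B (Python) =====
-- def check_col_for_rules(rules, col_numbers):
--     ''' Number-major re-implementation: maintain a shrinking candidate set of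
--         fields; each column number intersects it with the fields having an
--         interval containing that number (interval bounds are tested directly,
--         no range materialisation). Returns fields in rules-key order.
--     '''
--     candidates = set(rules)
--     for number in col_numbers:
--         if not candidates:
--             break
--         candidates = {field for field in candidates
--                       if any(lo <= number <= hi for lo, hi in rules[field])}
--     return [field for field in rules if field in candidates]
-- ===== Notes on version B (the rewrite author's own statement) =====
-- stated objective: alternative
-- what changed: Field-major loop that materialises every integer of every interval into a set is replaced by a number-major shrinking-candidate-set scan that tests interval bounds arithmetically and breaks early when no candidate survives.
import Mathlib
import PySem

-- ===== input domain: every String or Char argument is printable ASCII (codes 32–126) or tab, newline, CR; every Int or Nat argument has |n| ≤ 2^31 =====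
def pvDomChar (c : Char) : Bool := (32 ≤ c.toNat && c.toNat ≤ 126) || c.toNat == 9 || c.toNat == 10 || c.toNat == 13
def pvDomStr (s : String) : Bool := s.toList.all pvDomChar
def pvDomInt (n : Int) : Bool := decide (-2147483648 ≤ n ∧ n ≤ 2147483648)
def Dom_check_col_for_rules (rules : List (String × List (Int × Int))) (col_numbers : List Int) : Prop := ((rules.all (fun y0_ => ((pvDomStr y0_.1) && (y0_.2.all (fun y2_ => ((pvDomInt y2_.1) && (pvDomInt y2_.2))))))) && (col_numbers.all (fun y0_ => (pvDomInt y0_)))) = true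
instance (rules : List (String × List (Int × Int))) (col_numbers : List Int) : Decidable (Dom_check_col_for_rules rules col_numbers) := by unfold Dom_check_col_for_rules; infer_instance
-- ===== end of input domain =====

-- B replaces A's field-major loop over materialised integer ranges by a number-major
-- shrinking candidate set with direct interval-bound tests (objective: alternative decomposition).

-- ===== PORT A =====
-- A, literally: for each field (dict key order), build full_range = set of every
-- integer of every range(min, max+1), keep the field if all col_numbers are members.
def check_col_for_rules (rules : List (String × List (Int × Int))) (col_numbers : List Int) : List String :=
  let d := PySem.Dict.ofList rules
  d.keys.foldl (fun valid_rules field =>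
    let full_range : PySem.Set Int :=
      PySem.Set.update PySem.Set.empty
        ((d.getD field []).flatMap (fun p => PySem.List.pyRange p.1 (p.2 + 1) 1))
    if col_numbers.all (fun number => PySem.Set.contains full_range number) then
      valid_rules ++ [field]
    else valid_rules) []

-- ===== PORT B =====
def field_covers (ivs : List (Int × Int)) (n : Int) : Bool :=
  ivs.any (fun p => decide (p.1 ≤ n) && decide (n ≤ p.2))

-- the 'for number in col_numbers' loop of B, shrinking the candidate set, with early break
def shrink (d : PySem.Dict String (List (Int × Int))) (ns : List Int) (cand : List String) : List String :=
  match ns with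
  | [] => cand
  | n :: rest =>
      if cand.isEmpty then cand
      else shrink d rest (cand.filter (fun field => field_covers (d.getD field []) n))

def check_col_for_rules_alt (rules : List (String × List (Int × Int))) (col_numbers : List Int) : List String :=
  let d := PySem.Dict.ofList rules
  let survivors := shrink d col_numbers d.keys   -- candidates = set(rules)
  d.keys.filter (fun field => survivors.contains field)

-- ===== PRECONDITION & SPEC =====
def Spec_check_col_for_rules (rules : List (String × List (Int × Int))) (col_numbers : List Int) (out : List String) : Prop := out = check_col_for_rules_alt rules col_numbers
instance (rules : List (String × List (Int × Int))) (col_numbers : List Int) (out : List String) : Decidable (Spec_check_col_for_rules rules col_numbers out) := by unfold Spec_check_col_for_rules; infer_instance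

-- ===== CLAIM (what is proved, stated in full; the proofs are below) =====
def Claim_equal_check_col_for_rules : Prop := ∀ (rules : List (String × List (Int × Int))) (col_numbers : List Int), Dom_check_col_for_rules rules col_numbers → Spec_check_col_for_rules rules col_numbers (check_col_for_rules rules col_numbers)

-- ===== LEMMAS AND PROOFS =====

-- membership in A's materialised range-set = B's direct interval test
theorem cover_eq (ivs : List (Int × Int)) (n : Int) :
    PySem.Set.contains
      (PySem.Set.update PySem.Set.empty (ivs.flatMap (fun p => PySem.List.pyRange p.1 (p.2 + 1) 1))) n
    = field_covers ivs n := by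
  rw [Bool.eq_iff_iff]
  rw [PySem.Set.contains_iff]
  simp only [field_covers, PySem.Set.mem_update, List.mem_flatMap,
    PySem.List.mem_pyRange_one, List.any_eq_true, Bool.and_eq_true, decide_eq_true_eq]
  constructor
  · rintro (h | ⟨p, hp, h1, h2⟩)
    · simp [PySem.Set.empty] at h
    · exact ⟨p, hp, h1, by omega⟩
  · rintro ⟨p, hp, h1, h2⟩
    exact Or.inr ⟨p, hp, h1, by omega⟩

-- the shrinking loop is a single filter by "all numbers covered"
theorem shrink_eq (d : PySem.Dict String (List (Int × Int))) (ns : List Int) (cand : List String) :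
    shrink d ns cand
      = cand.filter (fun field => ns.all (fun n => field_covers (d.getD field []) n)) := by
  induction ns generalizing cand with
  | nil => simp [shrink]
  | cons n rest ih =>
      by_cases hc : cand = []
      · subst hc; simp [shrink]
      · rw [shrink]
        rw [if_neg (by simpa [List.isEmpty_iff] using hc)]
        rw [ih, List.filter_filter]
        apply List.filter_congr
        intro f _
        simp [Bool.and_comm]

theorem check_col_for_rules_eq (rules : List (String × List (Int × Int))) (col_numbers : List Int) :
    check_col_for_rules rules col_numbers = check_col_for_rules_alt rules col_numbers := by
  unfold check_col_for_rules check_col_for_rules_alt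
  simp only []
  rw [shrink_eq]
  rw [PySem.List.foldl_append_if_eq_filter]
  rw [List.nil_append]
  apply List.filter_congr
  intro field hf
  rw [Bool.eq_iff_iff]
  simp only [List.contains_iff_mem, List.mem_filter, List.all_eq_true]
  constructor
  · intro h
    refine ⟨hf, ?_⟩
    intro n hn
    rw [← cover_eq]
    exact h n hn
  · rintro ⟨-, h⟩
    intro n hn
    rw [cover_eq]
    exact h n hn

-- ===== VERDICT (by name: the statement is the Claim_ definition above) =====
theorem check_col_for_rules_spec : Claim_equal_check_col_for_rules := by
  intro rules col_numbers _
  unfold Spec_check_col_for_rules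
  exact check_col_for_rules_eq rules col_numbers
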